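-- pv_equiv track=rewrite | github.com/gurevichlab/nerpa | src/generic/combinatorics.py | subseq_occurences
-- ===== SOURCE A (Python) =====
-- from typing import (
--     Callable,
--     Generator,
--     Iterable,
--     List,
--     Tuple,
--     TypeVar, Optional
-- )
-- from itertools import (
--     combinations,
--     chain,
--     combinations_with_replacement,
--     groupby, product, pairwise
-- )
--
-- T = TypeVar('T')
--
-- def is_subsequence(subseq: List[T], seq: List[T]) -> bool:
--     '''
--     checks if subseq is a subsequence of seq
--     '''
--     subseq_idx = 0
--     seq_idx = 0
--     while subseq_idx < len(subseq) and seq_idx < len(seq):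
--         if subseq[subseq_idx] == seq[seq_idx]:
--             subseq_idx += 1
--         seq_idx += 1
--     return subseq_idx == len(subseq)
--
-- def subseq_occurences(subseq: List[T], seq: List[T]) -> Iterable[List[int]]:
--     '''
--     returns starting indices of all occurrences of subseq in seq
--     '''
--     if not is_subsequence(subseq, seq):
--         return
--
--     item_occurences = [
--         [i for i, x in enumerate(seq) if x == item]
--         for item in subseq
--     ]
--
--     for occurence_idxs in product(*item_occurences):
--         if all(idx1 < idx2
--                for idx1, idx2 in pairwise(occurence_idxs)):
--             yield list(occurence_idxs)
-- ===== SOURCE B (Python) =====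
-- def subseq_occurences(subseq, seq):
--     '''
--     returns starting indices of all occurrences of subseq in seq
--     '''
--     item_occurences = [
--         [i for i, x in enumerate(seq) if x == item]
--         for item in subseq
--     ]
--
--     def go(k, prev):
--         if k == len(item_occurences):
--             yield []
--             return
--         for i in item_occurences[k]:
--             if i > prev:
--                 for tail in go(k + 1, i):
--                     yield [i] + tail
--
--     yield from go(0, -1)
-- ===== Notes on version B (the rewrite author's own statement) =====
-- stated objective: faster
-- what changed: A materialises the full cartesian product of per-item occurrence lists and filters for increasing tuples (and needs a separate is_subsequence pre-check); B does a pruned depth-first backtracking over the occurrence lists, only ever extending prefixes whose indices are already strictly increasing, which also makes the pre-check unnecessary.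
import Mathlib
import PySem

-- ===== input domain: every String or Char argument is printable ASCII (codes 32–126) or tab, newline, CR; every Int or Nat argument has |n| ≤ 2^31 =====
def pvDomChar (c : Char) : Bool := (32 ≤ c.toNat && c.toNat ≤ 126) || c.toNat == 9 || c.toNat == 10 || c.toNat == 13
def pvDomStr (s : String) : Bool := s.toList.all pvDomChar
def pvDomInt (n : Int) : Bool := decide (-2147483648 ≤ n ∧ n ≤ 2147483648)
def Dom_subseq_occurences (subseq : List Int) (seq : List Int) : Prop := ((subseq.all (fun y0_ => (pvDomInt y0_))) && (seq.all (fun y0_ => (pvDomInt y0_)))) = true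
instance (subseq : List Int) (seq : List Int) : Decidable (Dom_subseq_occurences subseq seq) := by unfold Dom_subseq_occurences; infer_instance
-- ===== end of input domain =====

-- B replaces A's full cartesian product + increasing-filter by pruned backtracking over the
-- per-item occurrence lists (faster where items repeat; exact same output list).

-- ===== PORT A =====
-- while loop of is_subsequence: advance in seq, advance in subseq on a match
def pvIsSubseq : List Int → List Int → Bool
  | [], _ => true
  | _ :: _, [] => false
  | a :: as, b :: bs => if a == b then pvIsSubseq as bs else pvIsSubseq (a :: as) bs

-- [i for i, x in enumerate(seq) if x == item]
def pvOcc (seq : List Int) (item : Int) : List Int :=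
  ((PySem.List.enumerate seq).filter (fun p => p.2 == item)).map (fun p => p.1)

-- itertools.product(*lists) in Python's order (leftmost varies slowest)
def pvProduct : List (List Int) → List (List Int)
  | [] => [[]]
  | l :: rest => l.flatMap (fun x => (pvProduct rest).map (fun t => x :: t))

-- all(idx1 < idx2 for idx1, idx2 in pairwise(t))
def pvPairsInc : List Int → Bool
  | [] => true
  | [_] => true
  | a :: b :: t => decide (a < b) && pvPairsInc (b :: t)

def subseq_occurences (subseq : List Int) (seq : List Int) : List (List Int) :=
  if pvIsSubseq subseq seq then
    (pvProduct (subseq.map (pvOcc seq))).filter pvPairsInc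
  else []

-- ===== PORT B =====
-- backtracking: at each level take the occurrences larger than the previous index
def pvGo : List (List Int) → Int → List (List Int)
  | [], _ => [[]]
  | l :: rest, prev =>
      l.flatMap (fun i => if prev < i then (pvGo rest i).map (fun t => i :: t) else [])

def subseq_occurences_alt (subseq : List Int) (seq : List Int) : List (List Int) :=
  pvGo (subseq.map (pvOcc seq)) (-1)

-- ===== PRECONDITION & SPEC =====
def Spec_subseq_occurences (subseq : List Int) (seq : List Int) (out : List (List Int)) : Prop := out = subseq_occurences_alt subseq seq
instance (subseq : List Int) (seq : List Int) (out : List (List Int)) : Decidable (Spec_subseq_occurences subseq seq out) := by unfold Spec_subseq_occurences; infer_instance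

-- ===== CLAIM (what is proved, stated in full; the proofs are below) =====
def Claim_equal_subseq_occurences : Prop := ∀ (subseq : List Int) (seq : List Int), Dom_subseq_occurences subseq seq → Spec_subseq_occurences subseq seq (subseq_occurences subseq seq)

-- ===== LEMMAS AND PROOFS =====

-- strictly increasing starting from the bound p
def pvIncFrom (p : Int) : List Int → Bool
  | [] => true
  | a :: t => decide (p < a) && pvIncFrom a t

theorem pvGo_eq_filter (ls : List (List Int)) (p : Int) :
    pvGo ls p = (pvProduct ls).filter (pvIncFrom p) := by
  induction ls generalizing p with
  | nil => simp [pvGo, pvProduct, pvIncFrom]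
  | cons l rest ih =>
    simp only [pvGo, pvProduct, List.filter_flatMap]
    congr 1
    funext i
    by_cases h : p < i
    · have hf : (pvIncFrom p ∘ fun t => i :: t) = pvIncFrom i := by
        funext t; simp [Function.comp, pvIncFrom, h]
      simp only [h, if_pos, List.filter_map, ih, hf]
    · have hf : (pvIncFrom p ∘ fun t => i :: t) = fun _ => false := by
        funext t; simp [Function.comp, pvIncFrom, h]
      simp [h, List.filter_map, hf]

theorem pvIncFrom_eq_pairsInc (a : Int) (t : List Int) :
    pvIncFrom a t = pvPairsInc (a :: t) := by
  induction t generalizing a with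
  | nil => simp [pvIncFrom, pvPairsInc]
  | cons b t ih => simp [pvIncFrom, pvPairsInc, ih]

theorem pvMem_occ {seq : List Int} {item i : Int} (h : i ∈ pvOcc seq item) :
    ∃ n : Nat, i = (n : Int) ∧ ∃ hn : n < seq.length, seq[n] = item := by
  simp only [pvOcc, List.mem_map, List.mem_filter,
    PySem.List.mem_enumerate_iff] at h
  obtain ⟨p, ⟨⟨k, hk, rfl⟩, hitem⟩, rfl⟩ := h
  exact ⟨k, by simp, hk, by simpa using hitem⟩

theorem pvIncFrom_neg_one {seq subseq : List Int} {t : List Int}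
    (h : t ∈ pvProduct (subseq.map (pvOcc seq))) :
    pvIncFrom (-1) t = pvPairsInc t := by
  cases subseq with
  | nil =>
    simp [pvProduct] at h
    subst h; rfl
  | cons a rest =>
    simp only [List.map_cons, pvProduct, List.mem_flatMap, List.mem_map] at h
    obtain ⟨i, hi, t', ht', rfl⟩ := h
    obtain ⟨n, rfl, hn, -⟩ := pvMem_occ hi
    have hpp := pvIncFrom_eq_pairsInc (n : Int) t'
    simp [pvIncFrom, hpp, show (-1 : Int) < (n : Int) by omega]

theorem pvGo_sublist {seq : List Int} :
    ∀ (subseq : List Int) (p : Int) (t : List Int), -1 ≤ p →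
      t ∈ pvGo (subseq.map (pvOcc seq)) p →
      subseq.Sublist (seq.drop (p + 1).toNat) := by
  intro subseq
  induction subseq with
  | nil => intro p t _ _; simp
  | cons a rest ih =>
    intro p t hp ht
    simp only [List.map_cons, pvGo, List.mem_flatMap] at ht
    obtain ⟨i, hi, hti⟩ := ht
    split_ifs at hti with hpi
    · simp only [List.mem_map] at hti
      obtain ⟨t', ht', rfl⟩ := hti
      obtain ⟨n, rfl, hn, hs⟩ := pvMem_occ hi
      have hrest : rest.Sublist (seq.drop (n + 1)) := by
        have := ih (n : Int) t' (by omega) ht'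
        have he : (((n : Int)) + 1).toNat = n + 1 := by omega
        rwa [he] at this
      have h2 : (a :: rest).Sublist (seq.drop n) := by
        rw [List.drop_eq_getElem_cons hn, hs]
        exact List.Sublist.cons₂ a hrest
      have hk : (p + 1).toNat ≤ n := by omega
      have h3 : (seq.drop n).Sublist (seq.drop (p + 1).toNat) := by
        have hd : List.drop (n - (p + 1).toNat) (List.drop ((p + 1).toNat) seq)
            = List.drop n seq := by
          rw [List.drop_drop]; congr 1; omega
        exact hd ▸ List.drop_sublist _ _
      exact h2.trans h3
    · simp at hti

theorem pvSublist_isSubseq : ∀ (subseq seq : List Int),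
    subseq.Sublist seq → pvIsSubseq subseq seq = true := by
  intro sub seq h
  induction seq generalizing sub with
  | nil =>
    rw [List.sublist_nil.mp h]
    rfl
  | cons b bs ih =>
    cases sub with
    | nil => rfl
    | cons a as =>
      cases h with
      | cons _ h' =>
        by_cases hab : a = b
        · subst hab
          simp only [pvIsSubseq, beq_self_eq_true, if_true]
          exact ih _ (List.sublist_of_cons_sublist h')
        · simp only [pvIsSubseq, beq_iff_eq, hab, if_false]
          exact ih _ h'
      | cons₂ _ h' =>
        simp only [pvIsSubseq, beq_self_eq_true, if_true]
        exact ih _ h'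

-- ===== VERDICT (by name: the statement is the Claim_ definition above) =====
theorem subseq_occurences_spec : Claim_equal_subseq_occurences := by
  intro subseq seq _
  unfold Spec_subseq_occurences subseq_occurences subseq_occurences_alt
  rw [pvGo_eq_filter]
  by_cases h : pvIsSubseq subseq seq = true
  · simp only [h, if_true]
    exact List.filter_congr (fun t ht => (pvIncFrom_neg_one ht).symm)
  · simp only [Bool.not_eq_true] at h
    simp only [h, Bool.false_eq_true, if_false]
    rw [← pvGo_eq_filter]
    by_contra hne
    obtain ⟨t, ht⟩ := List.exists_mem_of_ne_nil _ (Ne.symm hne)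
    have hsub := pvGo_sublist subseq (-1) t (by norm_num) ht
    simp only [show ((-1 : Int) + 1).toNat = 0 by omega, List.drop_zero] at hsub
    have := pvSublist_isSubseq _ _ hsub
    rw [h] at this
    exact Bool.false_ne_true this
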